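-- pv_equiv track=rewrite | github.com/HQkim/algorithm | programmers/2020카카오/자물쇠와열쇠.py | solution
-- ===== SOURCE A (Python) =====
-- def solution(key, lock):
--     answer = False
--     N = len(lock[0])
--     M = len(key[0])
--
--     # 자물쇠의 홈을 기록
--     up_cnt = 0
--     for i in range(N):
--         for j in range(N):
--             if not lock[i][j]:
--                 up_cnt += 1
--
--     # 회전한 배열들
--     key_90 = rotate(key)
--     key_180 = rotate(key_90)
--     key_270 = rotate(key_180)
--
--     # 열쇠로 자물쇠를 열 수 있는지 체크하는 함수(열수 있으면 True, 없으면 False)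
--     def check(k, r, c):
--         is_p = True
--         dr = r - (M - 1)
--         dc = c - (M - 1)
--
--         cnt = 0
--         for i in range(M):
--             for j in range(M):
--                 r_lock = i + dr
--                 c_lock = j + dc
--                 if 0 <= r_lock < N and 0 <= c_lock < N:
--                     if not lock[r_lock][c_lock] and k[i][j]:  # 자물쇠 홈이고 열쇠는 돌기인 경우
--                         cnt += 1
--                     elif lock[r_lock][c_lock] and k[i][j]:  # 자물쇠와 열쇠 모두 돌기인 경우
--                         is_p = False
--                         break
--             if not is_p:
--                 break
--
--         if is_p and cnt == up_cnt:
--             return True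
--         else:
--             return False
--
--
--     # 가능한 모든 경우에 대해 체크하기
--     for i in range(N+M-1):
--         for j in range(N+M-1):
--             if check(key, i, j) or check(key_90, i, j) or check(key_180, i, j) or check(key_270, i, j):
--                 answer = True
--                 break
--         if answer:
--             break
--
--     return answer
--
-- def rotate(arr):
--     m = len(arr[0])
--     ret = [[0] * m for _ in range(m)]
--
--     for r in range(m):
--         for c in range(m):
--             ret[c][m-1-r] = arr[r][c]
--
--     return ret
-- ===== SOURCE B (Python) =====
-- def solution(key, lock):
--     N = len(lock[0])
--     M = len(key[0])
--     holes = [(i, j) for i in range(N) for j in range(N) if not lock[i][j]]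
--     pts = [(r, c) for r in range(M) for c in range(M) if key[r][c]]
--     if not holes:
--         # a fit means no key protrusion lands on the (hole-free) board at some offset
--         return any(
--             all(not (0 <= r + dr < N and 0 <= c + dc < N) for (r, c) in pts)
--             for dr in range(1 - M, N) for dc in range(1 - M, N))
--     hset = set(holes)
--     h0 = holes[0]
--     # a valid placement must cover the first hole, so only |pts| candidate offsets per rotation
--     for _ in range(4):
--         for (pr, pc) in pts:
--             dr = h0[0] - pr
--             dc = h0[1] - pc
--             cnt = 0
--             ok = True
--             for (r, c) in pts:
--                 r2 = r + dr
--                 c2 = c + dc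
--                 if 0 <= r2 < N and 0 <= c2 < N:
--                     if (r2, c2) in hset:
--                         cnt += 1
--                     else:
--                         ok = False
--                         break
--             if ok and cnt == len(holes):
--                 return True
--         pts = [(c, M - 1 - r) for (r, c) in pts]
--     return False
-- ===== Notes on version B (the rewrite author's own statement) =====
-- stated objective: faster
-- what changed: B replaces A's scan of all (N+M-1)^2 offsets per rotation with an anchor search: a valid placement must cover the lexicographically first hole, so only the |key-protrusions| offsets aligning some protrusion with that hole are tested, each with an early-breaking covered-cells-vs-hole-set scan; a lock with no holes is handled by a direct 'key fully off the board' search.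
import Mathlib
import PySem

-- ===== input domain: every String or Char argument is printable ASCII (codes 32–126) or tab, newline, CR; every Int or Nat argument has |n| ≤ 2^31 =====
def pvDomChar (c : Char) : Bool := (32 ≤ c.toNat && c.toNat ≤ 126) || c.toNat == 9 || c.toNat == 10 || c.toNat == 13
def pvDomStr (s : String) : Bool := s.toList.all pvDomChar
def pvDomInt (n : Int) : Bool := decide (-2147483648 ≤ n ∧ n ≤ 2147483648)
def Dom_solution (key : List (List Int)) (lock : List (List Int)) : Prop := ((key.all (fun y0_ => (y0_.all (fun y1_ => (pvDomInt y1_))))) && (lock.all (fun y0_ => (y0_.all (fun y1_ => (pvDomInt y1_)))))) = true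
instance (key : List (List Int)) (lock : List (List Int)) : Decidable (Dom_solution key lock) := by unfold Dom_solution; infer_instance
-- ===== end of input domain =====

-- B replaces A's scan of all (N+M-1)^2 offsets per rotation by an anchor search: a valid
-- placement must cover the first hole, so only the offsets aligning a key protrusion with that
-- hole are tested (set comparison of covered cells vs the hole list); a hole-free lock is handled
-- by a direct "key fully off the board" search (objective: faster; same exact return value).

-- ===== PORT A =====
-- helper `rotate`: builds the m×m rotated matrix by the assignments ret[c][m-1-r] = arr[r][c]
def pvRotate (arr : List (List Int)) : List (List Int) :=
  let m := (arr.headD []).length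
  (List.range m).foldl
    (fun ret r =>
      (List.range m).foldl
        (fun ret2 c => ret2.set c ((ret2.getD c []).set (m - 1 - r) ((arr.getD r []).getD c 0)))
        ret)
    (List.replicate m (List.replicate m 0))

-- inner `for j in range(M)` of `check`, with its break; state (is_p, cnt).
-- Indexing is done with getD: inside Pre_solution every access A makes is in range, so this is exact.
def pvJLoop (lock : List (List Int)) (krow : List Int) (N : Nat) (dr dc : Int) (i : Nat) :
    List Nat → Nat → Bool × Nat
  | [], cnt => (true, cnt)
  | j :: js, cnt =>
    let rl : Int := (i : Int) + dr
    let cl : Int := (j : Int) + dc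
    if 0 ≤ rl ∧ rl < (N : Int) ∧ 0 ≤ cl ∧ cl < (N : Int) then
      if (lock.getD rl.toNat []).getD cl.toNat 0 = 0 ∧ (krow.getD j 0) ≠ 0 then
        pvJLoop lock krow N dr dc i js (cnt + 1)
      else if (lock.getD rl.toNat []).getD cl.toNat 0 ≠ 0 ∧ (krow.getD j 0) ≠ 0 then
        (false, cnt)
      else pvJLoop lock krow N dr dc i js cnt
    else pvJLoop lock krow N dr dc i js cnt

-- outer `for i in range(M)` of `check`, with its break on is_p = False
def pvILoop (lock k : List (List Int)) (N M : Nat) (dr dc : Int) :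
    List Nat → Nat → Bool × Nat
  | [], cnt => (true, cnt)
  | i :: is, cnt =>
    let res := pvJLoop lock (k.getD i []) N dr dc i (List.range M) cnt
    if res.1 then pvILoop lock k N M dr dc is res.2 else (false, res.2)

def pvCheck (lock k : List (List Int)) (N M upCnt : Nat) (r c : Int) : Bool :=
  let dr := r - ((M : Int) - 1)
  let dc := c - ((M : Int) - 1)
  let res := pvILoop lock k N M dr dc (List.range M) 0
  res.1 && res.2 == upCnt

def pvUpCnt (lock : List (List Int)) (N : Nat) : Nat :=
  (List.range N).foldl
    (fun a i => (List.range N).foldl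
      (fun a j => if (lock.getD i []).getD j 0 = 0 then a + 1 else a) a) 0

def solution (key : List (List Int)) (lock : List (List Int)) : Bool :=
  let N := (lock.headD []).length
  let M := (key.headD []).length
  let upCnt := pvUpCnt lock N
  let k90 := pvRotate key
  let k180 := pvRotate k90
  let k270 := pvRotate k180
  (List.range (N + M - 1)).any fun i =>
    (List.range (N + M - 1)).any fun j =>
      pvCheck lock key N M upCnt (i : Int) (j : Int) ||
        pvCheck lock k90 N M upCnt (i : Int) (j : Int) ||
        pvCheck lock k180 N M upCnt (i : Int) (j : Int) ||
        pvCheck lock k270 N M upCnt (i : Int) (j : Int)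

-- ===== PORT B =====
-- holes = [(i, j) for i in range(N) for j in range(N) if not lock[i][j]]
def pvHolesList (lock : List (List Int)) (N : Nat) : List (Nat × Nat) :=
  (List.range N).flatMap fun i =>
    (List.range N).filterMap fun j =>
      if (lock.getD i []).getD j 0 = 0 then some (i, j) else none

-- pts = [(r, c) for r in range(M) for c in range(M) if key[r][c]]
def pvPts (key : List (List Int)) (M : Nat) : List (Nat × Nat) :=
  (List.range M).flatMap fun r =>
    (List.range M).filterMap fun c =>
      if (key.getD r []).getD c 0 ≠ 0 then some (r, c) else none

-- "0 <= p.1 + dr < N and 0 <= p.2 + dc < N": the cell lands on the board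
def pvInB (N : Nat) (dr dc : Int) (p : Nat × Nat) : Bool :=
  decide (0 ≤ (p.1 : Int) + dr) && decide ((p.1 : Int) + dr < (N : Int)) &&
    decide (0 ≤ (p.2 : Int) + dc) && decide ((p.2 : Int) + dc < (N : Int))

-- the inner `for (r, c) in pts` loop with its break: counts covered holes,
-- none = some protrusion lands on a filled lock cell (the `ok = False; break` path)
def pvCandScan (hset : List (Nat × Nat)) (N : Nat) (dr dc : Int) :
    List (Nat × Nat) → Nat → Option Nat
  | [], cnt => some cnt
  | q :: qs, cnt =>
    if pvInB N dr dc q then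
      if hset.contains (((q.1 : Int) + dr).toNat, ((q.2 : Int) + dc).toNat) then
        pvCandScan hset N dr dc qs (cnt + 1)
      else none
    else pvCandScan hset N dr dc qs cnt

-- body of the candidate loop: `if ok and cnt == len(holes): return True`
def pvCandTest (holes hset : List (Nat × Nat)) (N : Nat) (pts : List (Nat × Nat))
    (h0 p : Nat × Nat) : Bool :=
  match pvCandScan hset N ((h0.1 : Int) - (p.1 : Int)) ((h0.2 : Int) - (p.2 : Int)) pts 0 with
  | some cnt => cnt == holes.length
  | none => false

-- pts = [(c, M - 1 - r) for (r, c) in pts]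
def pvRotPts (M : Nat) (pts : List (Nat × Nat)) : List (Nat × Nat) :=
  pts.map fun p => (p.2, M - 1 - p.1)

-- `for _ in range(4)` with the early `return True`
def pvCandLoop (holes hset : List (Nat × Nat)) (N M : Nat) (h0 : Nat × Nat) :
    Nat → List (Nat × Nat) → Bool
  | 0, _ => false
  | t + 1, pts =>
    if pts.any (pvCandTest holes hset N pts h0) then true
    else pvCandLoop holes hset N M h0 t (pvRotPts M pts)

def solution_alt (key : List (List Int)) (lock : List (List Int)) : Bool :=
  let N := (lock.headD []).length
  let M := (key.headD []).length
  let holes := pvHolesList lock N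
  let pts := pvPts key M
  if holes.isEmpty then
    (PySem.List.pyRange (1 - (M : Int)) (N : Int) 1).any fun dr =>
      (PySem.List.pyRange (1 - (M : Int)) (N : Int) 1).any fun dc =>
        pts.all fun p => !(pvInB N dr dc p)
  else
    pvCandLoop holes (PySem.Set.ofList holes) N M (holes.headD (0, 0)) 4 pts

-- ===== PRECONDITION & SPEC =====
-- Pre_ excludes exactly the inputs on which Python A raises (IndexError): empty key/lock, an empty
-- first key row (rotate(rotate(key)) then indexes into an empty list), or a key/lock whose row
-- count or row lengths fall short of N = len(lock[0]) / M = len(key[0]).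
def Pre_solution (key : List (List Int)) (lock : List (List Int)) : Prop :=
  key ≠ [] ∧ lock ≠ [] ∧ key.headD [] ≠ [] ∧
  (lock.headD []).length ≤ lock.length ∧
  (∀ row ∈ lock.take (lock.headD []).length, (lock.headD []).length ≤ row.length) ∧
  (key.headD []).length ≤ key.length ∧
  (∀ row ∈ key.take (key.headD []).length, (key.headD []).length ≤ row.length)
instance (key : List (List Int)) (lock : List (List Int)) : Decidable (Pre_solution key lock) := by
  unfold Pre_solution; infer_instance

def pvWitness_solution : List (List Int) × List (List Int) := ([[1]], [[0]])

def Spec_solution (key : List (List Int)) (lock : List (List Int)) (out : Bool) : Prop := out = solution_alt key lock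
instance (key : List (List Int)) (lock : List (List Int)) (out : Bool) : Decidable (Spec_solution key lock out) := by unfold Spec_solution; infer_instance

-- ===== CLAIM (what is proved, stated in full; the proofs are below) =====
def Claim_equal_solution : Prop := ∀ (key : List (List Int)) (lock : List (List Int)), Dom_solution key lock → Pre_solution key lock → Spec_solution key lock (solution key lock)

-- ===== LEMMAS AND PROOFS =====

def pvG2 (ret : List (List Int)) (i j : Nat) : Int := (ret.getD i []).getD j 0

-- "the lock cell under p is a hole (0)"
def pvLvZ (lock : List (List Int)) (dr dc : Int) (p : Nat × Nat) : Bool :=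
  (lock.getD ((p.1 : Int) + dr).toNat []).getD ((p.2 : Int) + dc).toNat 0 == 0

-- common normal form of one placement test
def pvSpecTest (lock : List (List Int)) (N up : Nat) (pts : List (Nat × Nat)) (dr dc : Int) : Prop :=
  (∀ p ∈ pts, pvInB N dr dc p = true → pvLvZ lock dr dc p = true) ∧
    pts.countP (pvInB N dr dc) = up

theorem pv_inB_iff (N : Nat) (dr dc : Int) (p : Nat × Nat) :
    pvInB N dr dc p = true ↔
      0 ≤ (p.1 : Int) + dr ∧ (p.1 : Int) + dr < (N : Int) ∧
        0 ≤ (p.2 : Int) + dc ∧ (p.2 : Int) + dc < (N : Int) := by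
  simp [pvInB]; tauto

theorem pv_foldl_count {l : List Nat} {p : Nat → Prop} [DecidablePred p] {a : Nat} :
    l.foldl (fun a j => if p j then a + 1 else a) a = a + l.countP (fun j => decide (p j)) := by
  induction l generalizing a with
  | nil => simp
  | cons x xs ih => simp only [List.foldl_cons, List.countP_cons, ih]; split_ifs <;> simp_all; omega

theorem pv_upcnt_len (lock : List (List Int)) (N : Nat) :
    pvUpCnt lock N = (pvHolesList lock N).length := by
  unfold pvUpCnt pvHolesList
  rw [List.length_flatMap]
  have h : ∀ (l : List Nat) (a : Nat),
      l.foldl (fun a i => (List.range N).foldl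
        (fun a j => if (lock.getD i []).getD j 0 = 0 then a + 1 else a) a) a =
      a + (l.map fun i => ((List.range N).filterMap fun j =>
        if (lock.getD i []).getD j 0 = 0 then some (i, j) else none).length).sum := by
    intro l
    induction l with
    | nil => simp
    | cons x xs ih =>
      intro a
      simp only [List.foldl_cons, List.map_cons, List.sum_cons]
      rw [ih, pv_foldl_count, List.length_filterMap_eq_countP]
      have : (fun j => decide ((lock.getD x []).getD j 0 = 0)) =
          (fun j => ((if (lock.getD x []).getD j 0 = 0 then some (x, j) else none).isSome)) := by
        funext j; split_ifs <;> simp_all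
      rw [this]; omega
  simpa using h (List.range N) 0

theorem pv_jloop_fst (lock : List (List Int)) (krow : List Int) (N : Nat) (dr dc : Int) (i : Nat) :
    ∀ (js : List Nat) (cnt : Nat),
      ((pvJLoop lock krow N dr dc i js cnt).1 = true ↔
        ∀ j ∈ js, pvInB N dr dc (i, j) = true → krow.getD j 0 ≠ 0 → pvLvZ lock dr dc (i, j) = true) := by
  intro js
  induction js with
  | nil => intro cnt; simp [pvJLoop]
  | cons j js ih =>
    intro cnt
    simp only [pvJLoop]
    split_ifs with hg h1 h2
    · rw [ih]
      simp only [List.mem_cons, pvInB, pvLvZ]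
      constructor
      · rintro h x (rfl | hx)
        · intro _ _; simp only [beq_iff_eq]; exact h1.1
        · exact h x hx
      · intro h x hx; exact h x (Or.inr hx)
    · simp only [List.mem_cons]
      constructor
      · intro h; exact absurd h (by simp)
      · intro h
        exfalso
        have := h j (Or.inl rfl) (by simp [pvInB]; omega) h2.2
        simp [pvLvZ] at this
        exact h2.1 this
    · rw [ih]
      simp only [List.mem_cons]
      constructor
      · rintro h x (rfl | hx)
        · intro _ hk
          exfalso
          rcases em ((lock.getD ((i:Int)+dr).toNat []).getD ((x:Int)+dc).toNat 0 = 0) with hz | hz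
          · exact h1 ⟨hz, hk⟩
          · exact h2 ⟨hz, hk⟩
        · exact h x hx
      · intro h x hx; exact h x (Or.inr hx)
    · rw [ih]
      simp only [List.mem_cons]
      constructor
      · rintro h x (rfl | hx)
        · intro hb; exfalso; apply hg; simp [pvInB] at hb; tauto
        · exact h x hx
      · intro h x hx; exact h x (Or.inr hx)

theorem pv_jloop_run (lock : List (List Int)) (krow : List Int) (N : Nat) (dr dc : Int) (i : Nat) :
    ∀ (js : List Nat) (cnt : Nat),
      (∀ j ∈ js, pvInB N dr dc (i, j) = true → krow.getD j 0 ≠ 0 → pvLvZ lock dr dc (i, j) = true) →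
      pvJLoop lock krow N dr dc i js cnt =
        (true, cnt + js.countP (fun j => pvInB N dr dc (i, j) && !(krow.getD j 0 == 0))) := by
  intro js
  induction js with
  | nil => intro cnt _; simp [pvJLoop]
  | cons j js ih =>
    intro cnt h
    have hj := h j (List.mem_cons_self ..)
    have htl : ∀ x ∈ js, pvInB N dr dc (i, x) = true → krow.getD x 0 ≠ 0 →
        pvLvZ lock dr dc (i, x) = true := fun x hx => h x (List.mem_cons_of_mem _ hx)
    simp only [pvJLoop]
    split_ifs with hg h1 h2
    · rw [ih _ htl, List.countP_cons]
      have hp : (pvInB N dr dc (i, j) && !(krow.getD j 0 == 0)) = true := by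
        simp only [pvInB, Bool.and_eq_true, decide_eq_true_eq]
        refine ⟨⟨⟨by omega, by omega⟩, by omega⟩, by simpa using h1.2⟩
      rw [hp]
      simp only [Prod.mk.injEq, true_and, if_true]
      norm_num
      omega
    · exfalso
      have := hj (by simp [pvInB]; omega) h2.2
      simp [pvLvZ] at this
      exact h2.1 this
    · rw [ih _ htl, List.countP_cons]
      have hp : (pvInB N dr dc (i, j) && !(krow.getD j 0 == 0)) = false := by
        rcases em (krow.getD j 0 = 0) with hk | hk
        · have hbk : (!(krow.getD j 0 == 0)) = false := by rw [hk]; simp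
          rw [hbk, Bool.and_false]
        · exfalso
          rcases em ((lock.getD ((i:Int)+dr).toNat []).getD ((j:Int)+dc).toNat 0 = 0) with hz | hz
          · exact h1 ⟨hz, hk⟩
          · exact h2 ⟨hz, hk⟩
      rw [hp]
      simp
    · rw [ih _ htl, List.countP_cons]
      have hp : (pvInB N dr dc (i, j) && !(krow.getD j 0 == 0)) = false := by
        have hb : pvInB N dr dc (i, j) = false := by
          rw [Bool.eq_false_iff]
          intro hb; apply hg; simp [pvInB] at hb; tauto
        simp [hb]
      rw [hp]
      simp

theorem pv_iloop_fst (lock k : List (List Int)) (N M : Nat) (dr dc : Int) :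
    ∀ (is : List Nat) (cnt : Nat),
      ((pvILoop lock k N M dr dc is cnt).1 = true ↔
        ∀ i ∈ is, ∀ j ∈ List.range M,
          pvInB N dr dc (i, j) = true → (k.getD i []).getD j 0 ≠ 0 → pvLvZ lock dr dc (i, j) = true) := by
  intro is
  induction is with
  | nil => intro cnt; simp [pvILoop]
  | cons i is ih =>
    intro cnt
    simp only [pvILoop]
    by_cases hrow : ∀ j ∈ List.range M,
        pvInB N dr dc (i, j) = true → (k.getD i []).getD j 0 ≠ 0 → pvLvZ lock dr dc (i, j) = true
    · have h1 : (pvJLoop lock (k.getD i []) N dr dc i (List.range M) cnt).1 = true :=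
        (pv_jloop_fst lock (k.getD i []) N dr dc i (List.range M) cnt).mpr hrow
      rw [if_pos h1, ih]
      simp only [List.mem_cons]
      constructor
      · rintro h x (rfl | hx)
        · exact hrow
        · exact h x hx
      · intro h x hx; exact h x (Or.inr hx)
    · have h1 : (pvJLoop lock (k.getD i []) N dr dc i (List.range M) cnt).1 = false := by
        rw [Bool.eq_false_iff]
        intro hc
        exact hrow ((pv_jloop_fst lock (k.getD i []) N dr dc i (List.range M) cnt).mp hc)
      rw [if_neg (by rw [h1]; simp)]
      simp only [List.mem_cons]
      constructor
      · intro h; exact absurd h (by simp)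
      · intro h; exact absurd (h i (Or.inl rfl)) hrow

theorem pv_iloop_run (lock k : List (List Int)) (N M : Nat) (dr dc : Int) :
    ∀ (is : List Nat) (cnt : Nat),
      (∀ i ∈ is, ∀ j ∈ List.range M,
          pvInB N dr dc (i, j) = true → (k.getD i []).getD j 0 ≠ 0 → pvLvZ lock dr dc (i, j) = true) →
      pvILoop lock k N M dr dc is cnt =
        (true, cnt + (is.map (fun i => (List.range M).countP
          (fun j => pvInB N dr dc (i, j) && !((k.getD i []).getD j 0 == 0)))).sum) := by
  intro is
  induction is with
  | nil => intro cnt _; simp [pvILoop]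
  | cons i is ih =>
    intro cnt h
    have hrow := h i (List.mem_cons_self ..)
    have htl : ∀ x ∈ is, ∀ j ∈ List.range M,
        pvInB N dr dc (x, j) = true → (k.getD x []).getD j 0 ≠ 0 → pvLvZ lock dr dc (x, j) = true :=
      fun x hx => h x (List.mem_cons_of_mem _ hx)
    simp only [pvILoop]
    rw [pv_jloop_run lock (k.getD i []) N dr dc i (List.range M) cnt hrow]
    simp only [if_pos]
    rw [ih _ htl]
    simp only [List.map_cons, List.sum_cons, Prod.mk.injEq, true_and]
    omega

theorem pv_mem_pts (k : List (List Int)) (M : Nat) (p : Nat × Nat) :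
    p ∈ pvPts k M ↔ p.1 < M ∧ p.2 < M ∧ (k.getD p.1 []).getD p.2 0 ≠ 0 := by
  obtain ⟨a, b⟩ := p
  simp only [pvPts, List.mem_flatMap, List.mem_filterMap, List.mem_range,
    Option.ite_none_right_eq_some, Option.some.injEq]
  constructor
  · rintro ⟨r, hr, c, hc, hk, h⟩
    obtain ⟨rfl, rfl⟩ := Prod.mk.injEq .. ▸ h
    exact ⟨hr, hc, hk⟩
  · rintro ⟨ha, hb, hk⟩
    exact ⟨a, ha, b, hb, hk, rfl⟩

theorem pv_mem_holes (lock : List (List Int)) (N : Nat) (p : Nat × Nat) :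
    p ∈ pvHolesList lock N ↔ p.1 < N ∧ p.2 < N ∧ (lock.getD p.1 []).getD p.2 0 = 0 := by
  obtain ⟨a, b⟩ := p
  simp only [pvHolesList, List.mem_flatMap, List.mem_filterMap, List.mem_range,
    Option.ite_none_right_eq_some, Option.some.injEq]
  constructor
  · rintro ⟨r, hr, c, hc, hk, h⟩
    obtain ⟨rfl, rfl⟩ := Prod.mk.injEq .. ▸ h
    exact ⟨hr, hc, hk⟩
  · rintro ⟨ha, hb, hk⟩
    exact ⟨a, ha, b, hb, hk, rfl⟩

theorem pv_countP_filterMap {α β : Type} (g : α → Option β) (p : β → Bool) :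
    ∀ l : List α, (l.filterMap g).countP p =
      l.countP (fun a => ((g a).map p).getD false) := by
  intro l
  induction l with
  | nil => simp
  | cons x xs ih =>
    rw [List.filterMap_cons]
    cases hx : g x <;> simp [List.countP_cons, ih, hx]

theorem pv_pts_count (k : List (List Int)) (M N : Nat) (dr dc : Int) :
    (pvPts k M).countP (pvInB N dr dc) =
      ((List.range M).map (fun i => (List.range M).countP
        (fun j => pvInB N dr dc (i, j) && !((k.getD i []).getD j 0 == 0)))).sum := by
  unfold pvPts
  rw [List.countP_flatMap]
  congr 1
  apply List.map_congr_left
  intro i _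
  simp only [Function.comp_apply]
  rw [pv_countP_filterMap]
  apply List.countP_congr
  intro j _
  simp only [List.getD_eq_getElem?_getD]
  rcases em ((k[i]?.getD [])[j]?.getD 0 = 0) with hz | hz
  · simp [hz]
  · simp [hz]

theorem pv_check_norm (lock k : List (List Int)) (N M up : Nat) (r c : Int) :
    (pvCheck lock k N M up r c = true ↔
      pvSpecTest lock N up (pvPts k M) (r - ((M : Int) - 1)) (c - ((M : Int) - 1))) := by
  set dr := r - ((M : Int) - 1) with hdr
  set dc := c - ((M : Int) - 1) with hdc
  unfold pvCheck pvSpecTest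
  simp only []
  by_cases hall : ∀ i ∈ List.range M, ∀ j ∈ List.range M,
      pvInB N dr dc (i, j) = true → (k.getD i []).getD j 0 ≠ 0 → pvLvZ lock dr dc (i, j) = true
  · rw [pv_iloop_run lock k N M dr dc (List.range M) 0 hall]
    simp only [Bool.true_and, beq_iff_eq, Nat.zero_add]
    rw [← pv_pts_count k M N dr dc]
    constructor
    · intro hsum
      refine ⟨?_, hsum⟩
      intro p hp hin
      rw [pv_mem_pts] at hp
      exact hall p.1 (List.mem_range.mpr hp.1) p.2 (List.mem_range.mpr hp.2.1)
        (by simpa using hin) hp.2.2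
    · intro hs; exact hs.2
  · have h1 : (pvILoop lock k N M dr dc (List.range M) 0).1 = false := by
      rw [Bool.eq_false_iff]
      intro hc
      exact hall ((pv_iloop_fst lock k N M dr dc (List.range M) 0).mp hc)
    rw [h1]
    simp only [Bool.false_and]
    constructor
    · intro h; exact absurd h (by simp)
    · intro hs
      exfalso
      apply hall
      intro i hi j hj hin hk
      exact hs.1 (i, j) ((pv_mem_pts k M (i, j)).mpr
        ⟨List.mem_range.mp hi, List.mem_range.mp hj, hk⟩) hin

theorem pv_g2_set (ret : List (List Int)) (c b : Nat) (v : Int) (i j : Nat) :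
    pvG2 (ret.set c ((ret.getD c []).set b v)) i j =
      if i = c ∧ c < ret.length ∧ j = b ∧ b < (ret.getD c []).length then v
      else pvG2 ret i j := by
  simp only [pvG2, List.getD_eq_getElem?_getD, List.getElem?_set]
  by_cases hic : c = i
  · subst hic
    rw [if_pos rfl]
    by_cases hlen : c < ret.length
    · rw [if_pos hlen, Option.getD_some, List.getElem?_set]
      by_cases hjb : b = j
      · subst hjb
        rw [if_pos rfl]
        by_cases hbl : b < (ret[c]?.getD []).length
        · rw [if_pos hbl, Option.getD_some, if_pos ⟨rfl, hlen, rfl, hbl⟩]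
        · rw [if_neg hbl, Option.getD_none, if_neg (by tauto)]
          have h0 : (ret[c]?.getD [])[b]? = none := by
            rw [List.getElem?_eq_none_iff]; omega
          rw [h0]; rfl
      · rw [if_neg hjb, if_neg (by tauto)]
    · rw [if_neg hlen]
      have h2 : ret[c]? = none := by rw [List.getElem?_eq_none_iff]; omega
      rw [if_neg (by tauto), h2]
  · rw [if_neg hic, if_neg (fun h => hic h.1.symm)]

theorem pv_shape_step (ret : List (List Int)) (m c b : Nat) (v : Int)
    (h1 : ret.length = m) (h2 : ∀ row ∈ ret, row.length = m) :
    (ret.set c ((ret.getD c []).set b v)).length = m ∧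
      ∀ row ∈ ret.set c ((ret.getD c []).set b v), row.length = m := by
  refine ⟨by simp [h1], ?_⟩
  intro row hrow
  by_cases hc : c < ret.length
  · rcases List.mem_or_eq_of_mem_set hrow with h | h
    · exact h2 _ h
    · subst h
      rw [List.length_set, List.getD_eq_getElem?_getD, List.getElem?_eq_getElem hc,
        Option.getD_some]
      exact h2 _ (List.getElem_mem hc)
  · rw [List.set_eq_of_length_le (by omega)] at hrow
    exact h2 _ hrow

theorem pv_inner_shape (arr : List (List Int)) (m r : Nat) :
    ∀ (mc : Nat) (ret : List (List Int)), ret.length = m → (∀ row ∈ ret, row.length = m) →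
      (((List.range mc).foldl
        (fun ret2 c => ret2.set c ((ret2.getD c []).set (m - 1 - r) ((arr.getD r []).getD c 0)))
        ret).length = m ∧
       ∀ row ∈ (List.range mc).foldl
        (fun ret2 c => ret2.set c ((ret2.getD c []).set (m - 1 - r) ((arr.getD r []).getD c 0)))
        ret, row.length = m) := by
  intro mc
  induction mc with
  | zero => intro ret h1 h2; simpa using ⟨h1, h2⟩
  | succ n ih =>
    intro ret h1 h2
    rw [List.range_succ, List.foldl_append, List.foldl_cons, List.foldl_nil]
    obtain ⟨ha, hb⟩ := ih ret h1 h2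
    exact pv_shape_step _ m n _ _ ha hb

theorem pv_inner_entry (arr : List (List Int)) (m r i j : Nat) :
    ∀ (mc : Nat), mc ≤ m → ∀ (ret : List (List Int)),
      ret.length = m → (∀ row ∈ ret, row.length = m) →
      pvG2 ((List.range mc).foldl
        (fun ret2 c => ret2.set c ((ret2.getD c []).set (m - 1 - r) ((arr.getD r []).getD c 0)))
        ret) i j =
        if i < mc ∧ j = m - 1 - r then (arr.getD r []).getD i 0 else pvG2 ret i j := by
  intro mc
  induction mc with
  | zero =>
    intro _ ret h1 h2
    rw [List.range_zero, List.foldl_nil, if_neg (by omega)]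
  | succ n ih =>
    intro hle ret h1 h2
    rw [List.range_succ, List.foldl_append, List.foldl_cons, List.foldl_nil]
    obtain ⟨ha, hb⟩ := pv_inner_shape arr m r n ret h1 h2
    rw [pv_g2_set]
    have hrowlen : ((((List.range n).foldl
        (fun ret2 c => ret2.set c ((ret2.getD c []).set (m - 1 - r) ((arr.getD r []).getD c 0)))
        ret)).getD n []).length = m := by
      rw [List.getD_eq_getElem?_getD, List.getElem?_eq_getElem (by omega), Option.getD_some]
      exact hb _ (List.getElem_mem (by omega))
    rw [ih (by omega) ret h1 h2]
    rw [ha, hrowlen]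
    by_cases hin : i = n ∧ n < m ∧ j = m - 1 - r ∧ m - 1 - r < m
    · rw [if_pos hin, if_pos (by omega)]
      obtain ⟨rfl, -, -, -⟩ := hin
      rfl
    · rw [if_neg hin]
      by_cases hold : i < n ∧ j = m - 1 - r
      · rw [if_pos hold, if_pos (by omega)]
      · rw [if_neg hold, if_neg (by omega)]

theorem pv_outer_shape (arr : List (List Int)) (m : Nat) :
    ∀ (mr : Nat) (ret : List (List Int)), ret.length = m → (∀ row ∈ ret, row.length = m) →
      (((List.range mr).foldl
        (fun ret r => (List.range m).foldl
          (fun ret2 c => ret2.set c ((ret2.getD c []).set (m - 1 - r) ((arr.getD r []).getD c 0)))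
          ret) ret).length = m ∧
       ∀ row ∈ (List.range mr).foldl
        (fun ret r => (List.range m).foldl
          (fun ret2 c => ret2.set c ((ret2.getD c []).set (m - 1 - r) ((arr.getD r []).getD c 0)))
          ret) ret, row.length = m) := by
  intro mr
  induction mr with
  | zero => intro ret h1 h2; simpa using ⟨h1, h2⟩
  | succ n ih =>
    intro ret h1 h2
    rw [List.range_succ, List.foldl_append, List.foldl_cons, List.foldl_nil]
    obtain ⟨ha, hb⟩ := ih ret h1 h2
    exact pv_inner_shape arr m n m _ ha hb

theorem pv_outer_entry (arr : List (List Int)) (m i j : Nat) :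
    ∀ (mr : Nat), mr ≤ m → ∀ (ret : List (List Int)),
      ret.length = m → (∀ row ∈ ret, row.length = m) →
      pvG2 ((List.range mr).foldl
        (fun ret r => (List.range m).foldl
          (fun ret2 c => ret2.set c ((ret2.getD c []).set (m - 1 - r) ((arr.getD r []).getD c 0)))
          ret) ret) i j =
        if i < m ∧ j < m ∧ m - mr ≤ j then (arr.getD (m - 1 - j) []).getD i 0
        else pvG2 ret i j := by
  intro mr
  induction mr with
  | zero =>
    intro _ ret h1 h2
    rw [List.range_zero, List.foldl_nil, if_neg (by omega)]
  | succ n ih =>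
    intro hle ret h1 h2
    rw [List.range_succ, List.foldl_append, List.foldl_cons, List.foldl_nil]
    obtain ⟨ha, hb⟩ := pv_outer_shape arr m n ret h1 h2
    rw [pv_inner_entry arr m n i j m (le_refl m) _ ha hb]
    rw [ih (by omega) ret h1 h2]
    by_cases hnew : i < m ∧ j = m - 1 - n
    · rw [if_pos hnew, if_pos (by omega)]
      obtain ⟨-, rfl⟩ := hnew
      have : m - 1 - (m - 1 - n) = n := by omega
      rw [this]
    · rw [if_neg hnew]
      by_cases hold : i < m ∧ j < m ∧ m - n ≤ j
      · rw [if_pos hold, if_pos (by omega)]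
      · rw [if_neg hold, if_neg (by omega)]

theorem pv_rot_g2 (arr : List (List Int)) (i j : Nat) :
    pvG2 (pvRotate arr) i j =
      if i < (arr.headD []).length ∧ j < (arr.headD []).length then
        (arr.getD ((arr.headD []).length - 1 - j) []).getD i 0
      else 0 := by
  unfold pvRotate
  simp only []
  set m := (arr.headD []).length with hm
  have hbase : pvG2 (List.replicate m (List.replicate m (0:Int))) i j = 0 := by
    simp only [pvG2, List.getD_eq_getElem?_getD, List.getElem?_replicate]
    split_ifs <;> simp [List.getElem?_replicate] <;> split_ifs <;> rfl
  rw [pv_outer_entry arr m i j m (le_refl m) _ (by simp) (by simp)]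
  rw [hbase]
  by_cases h : i < m ∧ j < m
  · rw [if_pos (by omega), if_pos h]
  · rw [if_neg (by omega), if_neg h]

theorem pv_rot_head_len (arr : List (List Int)) :
    ((pvRotate arr).headD []).length = (arr.headD []).length := by
  set m := (arr.headD []).length with hm
  obtain ⟨ha, hb⟩ := pv_outer_shape arr m m (List.replicate m (List.replicate m 0))
    (by simp) (by simp)
  rcases hrot : pvRotate arr with _ | ⟨h, t⟩
  · have : (pvRotate arr).length = m := by
      unfold pvRotate; simp only []; rw [← hm]; exact ha
    rw [hrot] at this
    simp at this
    simp [← this]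
  · have hlen : ∀ row ∈ pvRotate arr, row.length = m := by
      unfold pvRotate; simp only []; rw [← hm]; exact hb
    have : h ∈ pvRotate arr := by rw [hrot]; exact List.mem_cons_self ..
    simpa using hlen h this

theorem pv_pts_nodup (k : List (List Int)) (M : Nat) : (pvPts k M).Nodup := by
  unfold pvPts
  rw [List.nodup_flatMap]
  constructor
  · intro r _
    apply List.Nodup.filterMap
    · intro a a' b hb hb'
      rw [Option.mem_def, Option.ite_none_right_eq_some, Option.some.injEq] at hb hb'
      have := hb.2.trans hb'.2.symm
      exact (Prod.mk.injEq .. ▸ this).2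
    · exact List.nodup_range
  · have : ∀ (r r' : Nat), r ≠ r' →
        Function.onFun List.Disjoint
          (fun r => (List.range M).filterMap fun c =>
            if (k.getD r []).getD c 0 ≠ 0 then some (r, c) else none) r r' := by
      intro r r' hne p hp hp'
      rw [List.mem_filterMap] at hp hp'
      obtain ⟨c, _, hc⟩ := hp
      obtain ⟨c', _, hc'⟩ := hp'
      rw [Option.ite_none_right_eq_some, Option.some.injEq] at hc hc'
      apply hne
      have h1 := congrArg Prod.fst hc.2
      have h2 := congrArg Prod.fst hc'.2
      simp at h1 h2
      omega
    exact List.Pairwise.imp_of_mem (fun {a b} _ _ h => this a b h)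
      ((List.pairwise_lt_range).imp_of_mem (fun {a b} _ _ h => Nat.ne_of_lt h))

theorem pv_pts_rot_perm (k : List (List Int)) :
    (pvPts (pvRotate k) ((k.headD []).length)).Perm
      (pvRotPts ((k.headD []).length) (pvPts k ((k.headD []).length))) := by
  set m := (k.headD []).length with hm
  apply (List.perm_ext_iff_of_nodup (pv_pts_nodup _ _) ?_).mpr
  · intro p
    rw [pv_mem_pts]
    unfold pvRotPts
    rw [List.mem_map]
    constructor
    · rintro ⟨h1, h2, hk⟩
      have hg2 : pvG2 (pvRotate k) p.1 p.2 ≠ 0 := by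
        simpa [pvG2] using hk
      rw [pv_rot_g2, ← hm, if_pos ⟨h1, h2⟩] at hg2
      refine ⟨(m - 1 - p.2, p.1), ?_, ?_⟩
      · rw [pv_mem_pts]
        exact ⟨by omega, h1, hg2⟩
      · simp only []
        have : m - 1 - (m - 1 - p.2) = p.2 := by omega
        rw [this]
    · rintro ⟨q, hq, rfl⟩
      rw [pv_mem_pts] at hq
      obtain ⟨hq1, hq2, hk⟩ := hq
      simp only []
      refine ⟨hq2, by omega, ?_⟩
      have : pvG2 (pvRotate k) q.2 (m - 1 - q.1) ≠ 0 := by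
        rw [pv_rot_g2, ← hm, if_pos ⟨hq2, by omega⟩]
        have h1 : m - 1 - (m - 1 - q.1) = q.1 := by omega
        rw [h1]
        simpa [pvG2] using hk
      simpa [pvG2] using this
  · apply List.Nodup.map_on
    · intro x hx y hy hxy
      rw [pv_mem_pts] at hx hy
      have e1 := congrArg Prod.fst hxy
      have e2 := congrArg Prod.snd hxy
      simp at e1 e2
      ext
      · omega
      · exact e1
    · exact pv_pts_nodup _ _

theorem pv_specTest_perm (lock : List (List Int)) (N up : Nat) {pts pts' : List (Nat × Nat)}
    (h : pts.Perm pts') (dr dc : Int) :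
    pvSpecTest lock N up pts dr dc ↔ pvSpecTest lock N up pts' dr dc := by
  unfold pvSpecTest
  rw [h.countP_eq]
  constructor <;> rintro ⟨h1, h2⟩ <;> refine ⟨?_, h2⟩ <;> intro p hp
  · exact h1 p (h.mem_iff.mpr hp)
  · exact h1 p (h.mem_iff.mp hp)

theorem pv_rotPts_bd (M : Nat) (pts : List (Nat × Nat))
    (hbd : ∀ p ∈ pts, p.1 < M ∧ p.2 < M) :
    ∀ p ∈ pvRotPts M pts, p.1 < M ∧ p.2 < M := by
  intro p hp
  unfold pvRotPts at hp
  rw [List.mem_map] at hp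
  obtain ⟨q, hq, rfl⟩ := hp
  have := hbd q hq
  exact ⟨this.2, by omega⟩

theorem pv_rotPts_nodup (M : Nat) (pts : List (Nat × Nat))
    (hbd : ∀ p ∈ pts, p.1 < M ∧ p.2 < M) (hnd : pts.Nodup) :
    (pvRotPts M pts).Nodup := by
  unfold pvRotPts
  apply List.Nodup.map_on _ hnd
  intro x hx y hy hxy
  have hx' := hbd x hx
  have hy' := hbd y hy
  obtain ⟨x1, x2⟩ := x
  obtain ⟨y1, y2⟩ := y
  simp only [Prod.mk.injEq] at hxy ⊢
  constructor
  · simp at hx' hy'; omega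
  · exact hxy.1

-- the multiset of board cells covered by key protrusions at offset (dr, dc)
def pvBoard (N : Nat) (pts : List (Nat × Nat)) (dr dc : Int) : List (Nat × Nat) :=
  pts.filterMap fun q =>
    if pvInB N dr dc q then some ((((q.1 : Int) + dr).toNat, ((q.2 : Int) + dc).toNat)) else none

theorem pv_board_length (N : Nat) (pts : List (Nat × Nat)) (dr dc : Int) :
    (pvBoard N pts dr dc).length = pts.countP (pvInB N dr dc) := by
  unfold pvBoard
  rw [List.length_filterMap_eq_countP]
  apply List.countP_congr
  intro p _
  cases h : pvInB N dr dc p <;> simp [h]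

theorem pv_mem_board (N : Nat) (pts : List (Nat × Nat)) (dr dc : Int) (q : Nat × Nat) :
    q ∈ pvBoard N pts dr dc ↔
      ∃ p ∈ pts, pvInB N dr dc p = true ∧
        q = (((p.1 : Int) + dr).toNat, ((p.2 : Int) + dc).toNat) := by
  unfold pvBoard
  rw [List.mem_filterMap]
  constructor
  · rintro ⟨p, hp, hc⟩
    by_cases hb : pvInB N dr dc p
    · rw [if_pos hb, Option.some.injEq] at hc
      exact ⟨p, hp, hb, hc.symm⟩
    · rw [if_neg hb] at hc; exact absurd hc (by simp)
  · rintro ⟨p, hp, hb, rfl⟩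
    exact ⟨p, hp, by rw [if_pos hb]⟩

theorem pv_board_nodup (N : Nat) (pts : List (Nat × Nat)) (dr dc : Int)
    (hnd : pts.Nodup) : (pvBoard N pts dr dc).Nodup := by
  unfold pvBoard
  apply List.Nodup.filterMap _ hnd
  intro a a' b hb hb'
  rw [Option.mem_def] at hb hb'
  by_cases ha : pvInB N dr dc a
  · by_cases ha' : pvInB N dr dc a'
    · rw [if_pos ha, Option.some.injEq] at hb
      rw [if_pos ha', Option.some.injEq] at hb'
      rw [pv_inB_iff] at ha ha'
      obtain ⟨a1, a2⟩ := a
      obtain ⟨a1', a2'⟩ := a'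
      have e1 := congrArg Prod.fst (hb.trans hb'.symm)
      have e2 := congrArg Prod.snd (hb.trans hb'.symm)
      simp only [Prod.mk.injEq] at *
      omega
    · rw [if_neg ha'] at hb'; exact absurd hb' (by simp)
  · rw [if_neg ha] at hb; exact absurd hb (by simp)

theorem pv_sub_of_nodup {l₁ l₂ : List (Nat × Nat)} (h1 : l₁.Nodup)
    (hsub : ∀ x ∈ l₁, x ∈ l₂) (hlen : l₂.length ≤ l₁.length) : ∀ x ∈ l₂, x ∈ l₁ := by
  have hperm : l₁.Perm l₂ := (h1.subperm hsub).perm_of_length_le hlen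
  intro x hx
  exact hperm.mem_iff.mpr hx

-- one placement test in B's form ↔ pvSpecTest
theorem pv_test_iff_spec (lock : List (List Int)) (N : Nat) (pts : List (Nat × Nat))
    (dr dc : Int) :
    ((∀ q ∈ pvBoard N pts dr dc, q ∈ pvHolesList lock N) ∧
        (pvBoard N pts dr dc).length = (pvHolesList lock N).length) ↔
      pvSpecTest lock N (pvHolesList lock N).length pts dr dc := by
  unfold pvSpecTest
  rw [pv_board_length]
  constructor
  · rintro ⟨hall, hlen⟩
    refine ⟨?_, hlen⟩
    intro p hp hin
    have hm := hall _ ((pv_mem_board N pts dr dc _).mpr ⟨p, hp, hin, rfl⟩)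
    rw [pv_mem_holes] at hm
    simp only [pvLvZ, beq_iff_eq]
    exact hm.2.2
  · rintro ⟨hall, hlen⟩
    refine ⟨?_, hlen⟩
    intro q hq
    rw [pv_mem_board] at hq
    obtain ⟨p, hp, hin, rfl⟩ := hq
    have hz := hall p hp hin
    rw [pv_inB_iff] at hin
    rw [pv_mem_holes]
    simp only [pvLvZ, beq_iff_eq] at hz
    exact ⟨by omega, by omega, hz⟩

theorem pv_contains_iff (lock : List (List Int)) (N : Nat) (q : Nat × Nat) :
    (PySem.Set.ofList (pvHolesList lock N)).contains q = true ↔ q ∈ pvHolesList lock N := by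
  rw [PySem.Set.contains_iff]
  exact PySem.Set.mem_ofList _ _

theorem pv_scan_some (hset : List (Nat × Nat)) (N : Nat) (dr dc : Int) :
    ∀ (pts : List (Nat × Nat)) (cnt : Nat),
      (∀ q ∈ pts, pvInB N dr dc q = true →
        hset.contains (((q.1 : Int) + dr).toNat, ((q.2 : Int) + dc).toNat) = true) →
      pvCandScan hset N dr dc pts cnt = some (cnt + pts.countP (pvInB N dr dc)) := by
  intro pts
  induction pts with
  | nil => intro cnt _; simp [pvCandScan]
  | cons q qs ih =>
    intro cnt h
    simp only [pvCandScan, List.countP_cons]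
    by_cases hin : pvInB N dr dc q = true
    · rw [if_pos hin, if_pos (h q (List.mem_cons_self ..) hin),
        ih _ (fun x hx => h x (List.mem_cons_of_mem _ hx))]
      rw [hin]
      simp only [if_pos, Option.some.injEq]
      omega
    · rw [if_neg hin, ih _ (fun x hx => h x (List.mem_cons_of_mem _ hx))]
      rw [Bool.eq_false_iff.mpr hin]
      simp

theorem pv_scan_none (hset : List (Nat × Nat)) (N : Nat) (dr dc : Int) :
    ∀ (pts : List (Nat × Nat)) (cnt : Nat),
      (∃ q ∈ pts, pvInB N dr dc q = true ∧
        hset.contains (((q.1 : Int) + dr).toNat, ((q.2 : Int) + dc).toNat) = false) →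
      pvCandScan hset N dr dc pts cnt = none := by
  intro pts
  induction pts with
  | nil => rintro cnt ⟨q, hq, -⟩; exact absurd hq (List.not_mem_nil)
  | cons q qs ih =>
    rintro cnt ⟨x, hx, hin, hco⟩
    simp only [pvCandScan]
    rcases List.mem_cons.mp hx with rfl | hx'
    · rw [if_pos hin, if_neg (by rw [hco]; simp)]
    · by_cases hq : pvInB N dr dc q = true
      · by_cases hc : hset.contains (((q.1 : Int) + dr).toNat, ((q.2 : Int) + dc).toNat) = true
        · rw [if_pos hq, if_pos hc]; exact ih _ ⟨x, hx', hin, hco⟩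
        · rw [if_pos hq, if_neg hc]
      · rw [if_neg hq]; exact ih _ ⟨x, hx', hin, hco⟩

theorem pv_candTest_iff (lock : List (List Int)) (N : Nat) (pts : List (Nat × Nat))
    (h0 p : Nat × Nat) :
    (pvCandTest (pvHolesList lock N) (PySem.Set.ofList (pvHolesList lock N)) N pts h0 p = true ↔
      pvSpecTest lock N (pvHolesList lock N).length pts
        ((h0.1 : Int) - (p.1 : Int)) ((h0.2 : Int) - (p.2 : Int))) := by
  rw [← pv_test_iff_spec]
  set dr := (h0.1 : Int) - (p.1 : Int)
  set dc := (h0.2 : Int) - (p.2 : Int)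
  have hmemiff : (∀ x ∈ pvBoard N pts dr dc, x ∈ pvHolesList lock N) ↔
      (∀ q ∈ pts, pvInB N dr dc q = true →
        (PySem.Set.ofList (pvHolesList lock N)).contains
          (((q.1 : Int) + dr).toNat, ((q.2 : Int) + dc).toNat) = true) := by
    constructor
    · intro h q hq hin
      rw [pv_contains_iff]
      exact h _ ((pv_mem_board N pts dr dc _).mpr ⟨q, hq, hin, rfl⟩)
    · intro h x hx
      rw [pv_mem_board] at hx
      obtain ⟨q, hq, hin, rfl⟩ := hx
      rw [← pv_contains_iff lock N]
      exact h q hq hin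
  unfold pvCandTest
  by_cases hall : ∀ q ∈ pts, pvInB N dr dc q = true →
      (PySem.Set.ofList (pvHolesList lock N)).contains
        (((q.1 : Int) + dr).toNat, ((q.2 : Int) + dc).toNat) = true
  · rw [pv_scan_some _ _ _ _ pts 0 hall]
    simp only [beq_iff_eq, Nat.zero_add]
    rw [pv_board_length]
    constructor
    · intro hlen; exact ⟨hmemiff.mpr hall, hlen⟩
    · rintro ⟨-, hlen⟩; exact hlen
  · have : ∃ q ∈ pts, pvInB N dr dc q = true ∧
        (PySem.Set.ofList (pvHolesList lock N)).contains
          (((q.1 : Int) + dr).toNat, ((q.2 : Int) + dc).toNat) = false := by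
      push_neg at hall
      obtain ⟨q, hq, hin, hc⟩ := hall
      exact ⟨q, hq, hin, Bool.eq_false_iff.mpr hc⟩
    rw [pv_scan_none _ _ _ _ pts 0 this]
    constructor
    · intro h; exact absurd h (by simp)
    · rintro ⟨hmem, -⟩
      exact absurd (hmemiff.mp hmem) hall

theorem pv_cand_equiv (lock : List (List Int)) (N M : Nat)
    (pts : List (Nat × Nat)) (hnd : pts.Nodup) (hbd : ∀ p ∈ pts, p.1 < M ∧ p.2 < M)
    (hne : pvHolesList lock N ≠ []) :
    (pts.any (pvCandTest (pvHolesList lock N) (PySem.Set.ofList (pvHolesList lock N)) N pts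
        ((pvHolesList lock N).headD (0, 0))) = true)
      ↔ ∃ dr : Int, (1 - (M : Int) ≤ dr ∧ dr < (N : Int)) ∧
          ∃ dc : Int, (1 - (M : Int) ≤ dc ∧ dc < (N : Int)) ∧
            pvSpecTest lock N (pvHolesList lock N).length pts dr dc := by
  set holes := pvHolesList lock N with hh
  set h0 := holes.headD (0, 0) with hh0
  have hmem0 : h0 ∈ holes := by
    rcases hl : holes with _ | ⟨x, xs⟩
    · exact absurd hl hne
    · rw [hh0, hl]; exact List.mem_cons_self ..
  have hb0 := (pv_mem_holes lock N h0).mp (hh ▸ hmem0)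
  rw [List.any_eq_true]
  constructor
  · rintro ⟨p, hp, hc⟩
    rw [pv_candTest_iff] at hc
    have hpb := hbd p hp
    exact ⟨(h0.1 : Int) - (p.1 : Int), by omega,
      (h0.2 : Int) - (p.2 : Int), by omega, hc⟩
  · rintro ⟨dr, _, dc, _, hs⟩
    have htest := (pv_test_iff_spec lock N pts dr dc).mpr hs
    obtain ⟨hall, hlen⟩ := htest
    have hcov : ∀ x ∈ pvHolesList lock N, x ∈ pvBoard N pts dr dc :=
      pv_sub_of_nodup (pv_board_nodup N pts dr dc hnd) hall (le_of_eq hlen.symm)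
    have h0b := hcov h0 (hh ▸ hmem0)
    rw [pv_mem_board] at h0b
    obtain ⟨p, hp, hin, heq⟩ := h0b
    rw [pv_inB_iff] at hin
    have hdr : dr = (h0.1 : Int) - (p.1 : Int) := by
      have := congrArg Prod.fst heq
      simp only [] at this
      omega
    have hdc : dc = (h0.2 : Int) - (p.2 : Int) := by
      have := congrArg Prod.snd heq
      simp only [] at this
      omega
    refine ⟨p, hp, ?_⟩
    rw [pv_candTest_iff]
    rw [hdr, hdc] at hs
    exact hs

-- the no-hole case: a placement passes A's test iff the key lands fully off the board
theorem pv_spec_allOff (lock : List (List Int)) (N : Nat)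
    (hz : pvHolesList lock N = []) (pts : List (Nat × Nat)) (dr dc : Int) :
    pvSpecTest lock N (pvHolesList lock N).length pts dr dc ↔
      ∀ p ∈ pts, pvInB N dr dc p = false := by
  rw [hz]
  unfold pvSpecTest
  simp only [List.length_nil]
  have hnoh : ∀ q : Nat × Nat, q.1 < N → q.2 < N → (lock.getD q.1 []).getD q.2 0 ≠ 0 := by
    intro q h1 h2 h3
    have : q ∈ pvHolesList lock N := (pv_mem_holes lock N q).mpr ⟨h1, h2, h3⟩
    rw [hz] at this
    exact absurd this (List.not_mem_nil)
  constructor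
  · rintro ⟨h1, _⟩
    intro p hp
    rw [Bool.eq_false_iff]
    intro hin
    have hlv := h1 p hp hin
    rw [pv_inB_iff] at hin
    simp only [pvLvZ, beq_iff_eq] at hlv
    exact hnoh (((p.1 : Int) + dr).toNat, ((p.2 : Int) + dc).toNat)
      (by simp only []; omega) (by simp only []; omega) hlv
  · intro h
    refine ⟨?_, ?_⟩
    · intro p hp hin
      rw [h p hp] at hin
      exact absurd hin (by simp)
    · rw [List.countP_eq_zero]
      intro p hp
      rw [h p hp]
      simp

theorem pv_rot_inB (N M : Nat) (p : Nat × Nat) (hp : p.1 < M) (dr' dc' : Int) :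
    pvInB N dr' dc' (p.2, M - 1 - p.1) = pvInB N ((N : Int) - (M : Int) - dc') dr' p := by
  rw [Bool.eq_iff_iff, pv_inB_iff, pv_inB_iff]
  simp only []
  constructor <;> intro h <;> omega

theorem pv_rot_allOff_exists (N M : Nat) (pts : List (Nat × Nat))
    (hbd : ∀ p ∈ pts, p.1 < M ∧ p.2 < M) :
    (∃ dr : Int, (1 - (M : Int) ≤ dr ∧ dr < (N : Int)) ∧
        ∃ dc : Int, (1 - (M : Int) ≤ dc ∧ dc < (N : Int)) ∧
          ∀ p ∈ pvRotPts M pts, pvInB N dr dc p = false) →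
    (∃ dr : Int, (1 - (M : Int) ≤ dr ∧ dr < (N : Int)) ∧
        ∃ dc : Int, (1 - (M : Int) ≤ dc ∧ dc < (N : Int)) ∧
          ∀ p ∈ pts, pvInB N dr dc p = false) := by
  rintro ⟨dr', hr', dc', hc', hall⟩
  refine ⟨(N : Int) - (M : Int) - dc', by omega, dr', hr', ?_⟩
  intro p hp
  have hm : (p.2, M - 1 - p.1) ∈ pvRotPts M pts := by
    unfold pvRotPts
    exact List.mem_map_of_mem hp
  have := hall _ hm
  rw [pv_rot_inB N M p (hbd p hp).1] at this
  exact this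

theorem pv_candloop_succ (holes hset : List (Nat × Nat)) (N M : Nat) (h0 : Nat × Nat)
    (t : Nat) (pts : List (Nat × Nat)) :
    pvCandLoop holes hset N M h0 (t + 1) pts =
      (pts.any (pvCandTest holes hset N pts h0) ||
        pvCandLoop holes hset N M h0 t (pvRotPts M pts)) := by
  cases h : pts.any (pvCandTest holes hset N pts h0) <;> simp [pvCandLoop, h]

theorem pv_exists_offsets (Q : Int → Int → Prop) (N M : Nat) :
    (∃ i : Nat, i < N + M - 1 ∧ ∃ j : Nat, j < N + M - 1 ∧
        Q ((i : Int) - ((M : Int) - 1)) ((j : Int) - ((M : Int) - 1))) ↔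
      (∃ dr : Int, (1 - (M : Int) ≤ dr ∧ dr < (N : Int)) ∧
        ∃ dc : Int, (1 - (M : Int) ≤ dc ∧ dc < (N : Int)) ∧ Q dr dc) := by
  constructor
  · rintro ⟨i, hi, j, hj, hq⟩
    exact ⟨(i : Int) - ((M : Int) - 1), by omega, (j : Int) - ((M : Int) - 1), by omega, hq⟩
  · rintro ⟨dr, ⟨h1, h2⟩, dc, ⟨h3, h4⟩, hq⟩
    refine ⟨(dr + (M : Int) - 1).toNat, by omega, (dc + (M : Int) - 1).toNat, by omega, ?_⟩
    have e1 : (((dr + (M : Int) - 1).toNat : Int)) - ((M : Int) - 1) = dr := by omega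
    have e2 : (((dc + (M : Int) - 1).toNat : Int)) - ((M : Int) - 1) = dc := by omega
    rw [e1, e2]; exact hq

theorem pv_main (key lock : List (List Int)) : solution key lock = solution_alt key lock := by
  simp only [solution, solution_alt]
  set N := (lock.headD []).length with hN
  set M := (key.headD []).length with hM
  rw [pv_upcnt_len]
  -- the four point lists B works with, with their invariants
  set P0 := pvPts key M with hP0
  set P1 := pvRotPts M P0 with hP1
  set P2 := pvRotPts M P1 with hP2
  set P3 := pvRotPts M P2 with hP3
  have hbd0 : ∀ p ∈ P0, p.1 < M ∧ p.2 < M := by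
    intro p hp; rw [hP0, pv_mem_pts] at hp; exact ⟨hp.1, hp.2.1⟩
  have hnd0 : P0.Nodup := hP0 ▸ pv_pts_nodup key M
  have hbd1 := pv_rotPts_bd M P0 hbd0
  have hnd1 := pv_rotPts_nodup M P0 hbd0 hnd0
  have hbd2 := pv_rotPts_bd M P1 hbd1
  have hnd2 := pv_rotPts_nodup M P1 hbd1 hnd1
  have hbd3 := pv_rotPts_bd M P2 hbd2
  have hnd3 := pv_rotPts_nodup M P2 hbd2 hnd2
  -- A's rotated keys give point lists permuted with B's coordinate-rotated ones
  have h90 : (pvPts (pvRotate key) M).Perm P1 := by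
    have t := pv_pts_rot_perm key
    rwa [← hM, ← hP0, ← hP1] at t
  have h180 : (pvPts (pvRotate (pvRotate key)) M).Perm P2 := by
    have t := pv_pts_rot_perm (pvRotate key)
    rw [pv_rot_head_len key, ← hM] at t
    refine t.trans ?_
    rw [hP2]
    unfold pvRotPts
    exact h90.map _
  have h270 : (pvPts (pvRotate (pvRotate (pvRotate key))) M).Perm P3 := by
    have t := pv_pts_rot_perm (pvRotate (pvRotate key))
    rw [pv_rot_head_len (pvRotate key), pv_rot_head_len key, ← hM] at t
    refine t.trans ?_
    rw [hP3]
    unfold pvRotPts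
    exact h180.map _
  by_cases hz : pvHolesList lock N = []
  · -- no holes: both sides say "the key can land fully off the board"
    rw [hz]
    simp only [List.isEmpty_nil, if_pos]
    rw [Bool.eq_iff_iff]
    simp only [List.any_eq_true, List.mem_range, Bool.or_eq_true, pv_check_norm,
      PySem.List.mem_pyRange_one, List.all_eq_true, Bool.not_eq_true']
    have hso : ∀ (pts : List (Nat × Nat)) (dr dc : Int),
        pvSpecTest lock N (pvHolesList lock N).length pts dr dc ↔
          ∀ p ∈ pts, pvInB N dr dc p = false := pv_spec_allOff lock N hz
    rw [hz] at hso
    simp only [hso]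
    constructor
    · rintro ⟨i, hi, j, hj, h4⟩
      have hconv : ∀ (pts : List (Nat × Nat)),
          (∀ p ∈ pts, pvInB N ((i : Int) - ((M : Int) - 1)) ((j : Int) - ((M : Int) - 1)) p = false) →
          ∃ dr : Int, (1 - (M : Int) ≤ dr ∧ dr < (N : Int)) ∧
            ∃ dc : Int, (1 - (M : Int) ≤ dc ∧ dc < (N : Int)) ∧
              ∀ p ∈ pts, pvInB N dr dc p = false := by
        intro pts h
        exact (pv_exists_offsets (fun dr dc => ∀ p ∈ pts, pvInB N dr dc p = false) N M).mp
          ⟨i, hi, j, hj, h⟩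
      rcases h4 with ((h | h) | h) | h
      · exact hconv P0 (fun p hp => h p (by rwa [hP0] at hp))
      · refine pv_rot_allOff_exists N M P0 hbd0 ?_
        rw [← hP1]
        exact hconv P1 (fun p hp => h p (h90.mem_iff.mpr hp))
      · refine pv_rot_allOff_exists N M P0 hbd0 (pv_rot_allOff_exists N M P1 hbd1 ?_)
        rw [← hP2]
        exact hconv P2 (fun p hp => h p (h180.mem_iff.mpr hp))
      · refine pv_rot_allOff_exists N M P0 hbd0
          (pv_rot_allOff_exists N M P1 hbd1 (pv_rot_allOff_exists N M P2 hbd2 ?_))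
        rw [← hP3]
        exact hconv P3 (fun p hp => h p (h270.mem_iff.mpr hp))
    · rintro ⟨dr, h1, dc, h2, h3⟩
      have := (pv_exists_offsets
        (fun dr dc => ∀ p ∈ pvPts key M, pvInB N dr dc p = false) N M).mpr
        ⟨dr, h1, dc, h2, fun p hp => h3 p (by rwa [← hP0] at hp)⟩
      obtain ⟨i, hi, j, hj, h⟩ := this
      exact ⟨i, hi, j, hj, Or.inl (Or.inl (Or.inl h))⟩
  · -- at least one hole: the anchor search
    rw [if_neg (by simpa [List.isEmpty_iff] using hz)]
    rw [pv_candloop_succ, pv_candloop_succ, pv_candloop_succ, pv_candloop_succ]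
    rw [show pvCandLoop (pvHolesList lock N) (PySem.Set.ofList (pvHolesList lock N)) N M
      ((pvHolesList lock N).headD (0, 0)) 0
      (pvRotPts M P3) = false from rfl, Bool.or_false]
    rw [Bool.eq_iff_iff]
    simp only [List.any_eq_true, List.mem_range, Bool.or_eq_true, pv_check_norm]
    rw [← List.any_eq_true, ← List.any_eq_true, ← List.any_eq_true, ← List.any_eq_true,
      pv_cand_equiv lock N M P0 hnd0 hbd0 hz,
      pv_cand_equiv lock N M P1 hnd1 hbd1 hz,
      pv_cand_equiv lock N M P2 hnd2 hbd2 hz,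
      pv_cand_equiv lock N M P3 hnd3 hbd3 hz]
    simp only [fun dr dc => pv_specTest_perm lock N (pvHolesList lock N).length h90 dr dc,
      fun dr dc => pv_specTest_perm lock N (pvHolesList lock N).length h180 dr dc,
      fun dr dc => pv_specTest_perm lock N (pvHolesList lock N).length h270 dr dc]
    rw [← pv_exists_offsets (fun dr dc =>
        pvSpecTest lock N (pvHolesList lock N).length P0 dr dc) N M,
      ← pv_exists_offsets (fun dr dc =>
        pvSpecTest lock N (pvHolesList lock N).length P1 dr dc) N M,
      ← pv_exists_offsets (fun dr dc =>
        pvSpecTest lock N (pvHolesList lock N).length P2 dr dc) N M,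
      ← pv_exists_offsets (fun dr dc =>
        pvSpecTest lock N (pvHolesList lock N).length P3 dr dc) N M]
    constructor
    · rintro ⟨i, hi, j, hj, (((h | h) | h) | h)⟩
      · exact Or.inl ⟨i, hi, j, hj, hP0 ▸ h⟩
      · exact Or.inr (Or.inl ⟨i, hi, j, hj, h⟩)
      · exact Or.inr (Or.inr (Or.inl ⟨i, hi, j, hj, h⟩))
      · exact Or.inr (Or.inr (Or.inr ⟨i, hi, j, hj, h⟩))
    · rintro (⟨i, hi, j, hj, h⟩ | ⟨i, hi, j, hj, h⟩ | ⟨i, hi, j, hj, h⟩ | ⟨i, hi, j, hj, h⟩)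
      · exact ⟨i, hi, j, hj, Or.inl (Or.inl (Or.inl (hP0 ▸ h)))⟩
      · exact ⟨i, hi, j, hj, Or.inl (Or.inl (Or.inr h))⟩
      · exact ⟨i, hi, j, hj, Or.inl (Or.inr h)⟩
      · exact ⟨i, hi, j, hj, Or.inr h⟩

-- ===== VERDICT (by name: the statement is the Claim_ definition above) =====
theorem solution_spec : Claim_equal_solution := by
  intro key lock _ _
  unfold Spec_solution
  exact pv_main key lock
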